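-- pv_equiv track=rewrite | github.com/Hammawa/Recursion | Recursion.py | mylen
-- ===== SOURCE A (Python) =====
-- def mylen(some_list):
--     '''Determines the length of a list recursively'''
--     empty_list = []
--     if some_list == empty_list:
--         length = 0
--         return length
--     else:
--         some_list.pop()
--         length = mylen(some_list) + 1
--     return length
-- ===== SOURCE B (Python) =====
-- def mylen(some_list):
--     '''Determines the length of a list via the built-in len (non-destructive)'''
--     return len(some_list)
-- ===== Notes on version B (the rewrite author's own statement) =====
-- stated objective: idiomatic
-- what changed: Replaced the destructive pop-and-recurse counting with a single call to the built-in len; return value identical, but B does not mutate the input list (A empties it).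
import Mathlib
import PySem

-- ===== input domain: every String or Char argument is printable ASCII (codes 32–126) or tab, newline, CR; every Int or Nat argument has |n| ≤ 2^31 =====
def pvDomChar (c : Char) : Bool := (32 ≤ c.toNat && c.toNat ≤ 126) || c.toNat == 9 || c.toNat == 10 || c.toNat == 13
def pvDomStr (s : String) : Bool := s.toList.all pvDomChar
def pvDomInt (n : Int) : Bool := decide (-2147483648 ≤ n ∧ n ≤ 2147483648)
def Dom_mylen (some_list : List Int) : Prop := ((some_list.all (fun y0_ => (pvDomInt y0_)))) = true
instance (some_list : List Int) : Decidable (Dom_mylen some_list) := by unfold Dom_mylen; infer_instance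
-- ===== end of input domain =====

-- B replaces A's destructive pop-and-recurse counting with the built-in len (idiomatic);
-- return value proved equal. Side effect differs: A empties the input list, B leaves it untouched;
-- the equivalence proved here is about the RETURN value only.

-- ===== PORT A =====
-- A: if list == [] return 0 else pop (drop last element) and recurse, +1.
def mylen (some_list : List Int) : Int :=
  if some_list == [] then 0
  else mylen some_list.dropLast + 1
termination_by some_list.length
decreasing_by
  rename_i h
  simp only [beq_iff_eq] at h
  have : 0 < some_list.length := List.length_pos_iff.mpr h
  simp [List.length_dropLast]; omega

-- ===== PORT B =====
-- B: len(some_list), ported as List.length.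
def mylen_alt (some_list : List Int) : Int := (some_list.length : Int)

-- ===== PRECONDITION & SPEC =====
def Spec_mylen (some_list : List Int) (out : Int) : Prop := out = mylen_alt some_list
instance (some_list : List Int) (out : Int) : Decidable (Spec_mylen some_list out) := by unfold Spec_mylen; infer_instance

-- ===== CLAIM =====
def Claim_equal_mylen : Prop := ∀ (some_list : List Int), Dom_mylen some_list → Spec_mylen some_list (mylen some_list)

-- ===== LEMMAS AND PROOFS =====
theorem mylen_eq_length (l : List Int) : mylen l = l.length := by
  induction l using List.reverseRecOn with
  | nil => simp [mylen]
  | append_singleton l a ih =>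
    rw [mylen]
    simp [ih]

-- ===== VERDICT =====
theorem mylen_spec : Claim_equal_mylen := by
  intro l _
  unfold Spec_mylen mylen_alt
  rw [mylen_eq_length]
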